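-- pv_equiv track=rewrite | github.com/Lisihong89757/Bioinfo-algorithms | frequancy array.py | N2P
-- ===== SOURCE A (Python) =====
-- dict2 = {0:"A",1:"C",2:"G",3:"T"}
--
-- def N2P(Index, k):
--     if k == 1:
--         dna = dict2[Index]
--         return dna
--     temp = Index%4
--     Index = Index//4
--     dna = dict2[temp]
--     return N2P(Index,k-1)+ dna
-- ===== SOURCE B (Python) =====
-- dict2 = {0:"A",1:"C",2:"G",3:"T"}
--
-- def N2P(Index, k):
--     out = []
--     for _ in range(k):
--         out.append("ACGT"[Index % 4])
--         Index //= 4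
--     return "".join(reversed(out))
-- ===== Notes on version B (the rewrite author's own statement) =====
-- stated objective: simpler
-- what changed: Replaced A's recursion (divmod then recursive call on k-1 with string concatenation) by a single iterative loop that collects the k base-4 digit letters and joins them reversed.
import Mathlib
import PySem

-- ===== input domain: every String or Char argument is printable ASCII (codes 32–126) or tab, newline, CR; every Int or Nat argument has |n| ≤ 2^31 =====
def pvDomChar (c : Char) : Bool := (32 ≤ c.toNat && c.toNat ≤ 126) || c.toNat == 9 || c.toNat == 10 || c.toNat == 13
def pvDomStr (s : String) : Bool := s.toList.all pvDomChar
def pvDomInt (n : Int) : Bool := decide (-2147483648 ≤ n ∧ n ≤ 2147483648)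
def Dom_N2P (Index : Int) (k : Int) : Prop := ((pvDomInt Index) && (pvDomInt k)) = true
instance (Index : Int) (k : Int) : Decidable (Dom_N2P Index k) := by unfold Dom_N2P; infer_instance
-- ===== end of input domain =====

-- B replaces A's recursion by an iterative digit loop (collect base-4 digit letters, join reversed); simpler, equal on Pre_.


-- ===== PORT A =====
-- dict2 = {0:"A",1:"C",2:"G",3:"T"}
def dict2 : PySem.Dict Int String :=
  PySem.Dict.insert (PySem.Dict.insert (PySem.Dict.insert (PySem.Dict.insert PySem.Dict.empty 0 "A") 1 "C") 2 "G") 3 "T"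

-- A recurses with k decreasing by 1 until k == 1; fuel k.toNat bounds that recursion.
-- For k ≤ 0 the Python recursion never reaches the base case (RecursionError) — excluded
-- by Pre_; dict2[…] is a KeyError-raising lookup in Python, here .getD "" only reachable
-- outside Pre_.
def N2Pgo (Index : Int) (k : Int) : Nat → String
  | 0 => ""
  | fuel + 1 =>
    if k == 1 then
      (PySem.Dict.get? dict2 Index).getD ""
    else
      let temp := PySem.Int.mod Index 4
      let Index' := PySem.Int.floordiv Index 4
      let dna := (PySem.Dict.get? dict2 temp).getD ""
      N2Pgo Index' (k - 1) fuel ++ dna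

def N2P (Index : Int) (k : Int) : String := N2Pgo Index k k.toNat

-- ===== PORT B =====
-- the loop appends the one-char string "ACGT"[Index % 4] then Index //= 4; the
-- appended-order list is kept reversed (cons at head), so Source B's "".join(reversed(out))
-- is a plain "".join of the accumulator.  Index % 4 is always in 0..3, so the string
-- index never raises ('.getD ""' is unreachable).
def N2P_alt (Index : Int) (k : Int) : String :=
  let st := (List.range k.toNat).foldl
    (fun (p : List String × Int) _ =>
      ((((PySem.Str.pyGet? "ACGT" (PySem.Int.mod p.2 4)).map
           (fun c => String.ofList [c])).getD "") :: p.1,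
        PySem.Int.floordiv p.2 4))
    ([], Index)
  PySem.Str.join "" st.1

-- ===== PRECONDITION & SPEC =====
-- Pre_ excludes exactly the inputs where A raises: k ≤ 0 (RecursionError) and
-- Index outside [0, 4^k) (KeyError on the final dict lookup).
def Pre_N2P (Index : Int) (k : Int) : Prop := 1 ≤ k ∧ 0 ≤ Index ∧ Index < (4 : Int) ^ k.toNat
instance (Index : Int) (k : Int) : Decidable (Pre_N2P Index k) := by unfold Pre_N2P; infer_instance
def pvWitness_N2P : Int × Int := (11, 3)

def Spec_N2P (Index : Int) (k : Int) (out : String) : Prop := out = N2P_alt Index k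
instance (Index : Int) (k : Int) (out : String) : Decidable (Spec_N2P Index k out) := by unfold Spec_N2P; infer_instance

-- ===== CLAIM (what is proved, stated in full; the proofs are below) =====
def Claim_equal_N2P : Prop := ∀ (Index : Int) (k : Int), Dom_N2P Index k → Pre_N2P Index k → Spec_N2P Index k (N2P Index k)

-- ===== LEMMAS AND PROOFS =====

-- "".join over List Char side: [].intercalate is flatten
theorem pvJoinNil : ∀ (L : List (List Char)), [].intercalate L = L.flatten
  | [] => by simp [List.intercalate]
  | [x] => by simp [List.intercalate]
  | x :: y :: L => by
    have := pvJoinNil (y :: L)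
    simp [List.intercalate, List.intersperse] at this ⊢
    simpa using this

theorem pvJoin_append_singleton (xs : List String) (s : String) :
    PySem.Str.join "" (xs ++ [s]) = PySem.Str.join "" xs ++ s := by
  simp [PySem.Str.join, PySem.Chars.join, pvJoinNil]

theorem pvJoin_singleton (s : String) : PySem.Str.join "" [s] = s := by
  simp [PySem.Str.join, PySem.Chars.join, pvJoinNil]

-- the single-digit letter B picks
def pvC (i : Int) : String :=
  ((PySem.Str.pyGet? "ACGT" (PySem.Int.mod i 4)).map (fun c => String.ofList [c])).getD ""
-- Index after n loop steps
def pvD (n : Nat) (I : Int) : Int := Nat.rec I (fun _ d => PySem.Int.floordiv d 4) n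
-- B's accumulated (reversed) list after n steps
def pvL : Nat → Int → List String
  | 0, _ => []
  | n + 1, I => pvC (pvD n I) :: pvL n I

theorem pvFold_eq (n : Nat) (I : Int) :
    (List.range n).foldl
      (fun (p : List String × Int) _ =>
        ((((PySem.Str.pyGet? "ACGT" (PySem.Int.mod p.2 4)).map
             (fun c => String.ofList [c])).getD "") :: p.1,
          PySem.Int.floordiv p.2 4))
      ([], I) = (pvL n I, pvD n I) := by
  induction n with
  | zero => rfl
  | succ n ih => rw [List.range_succ, List.foldl_append, ih]; rfl

theorem pvD_shift (n : Nat) (I : Int) :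
    pvD n (PySem.Int.floordiv I 4) = pvD (n + 1) I := by
  induction n with
  | zero => rfl
  | succ n ih =>
    show PySem.Int.floordiv (pvD n (PySem.Int.floordiv I 4)) 4 = PySem.Int.floordiv (pvD (n + 1) I) 4
    rw [ih]

theorem pvL_shift (n : Nat) (I : Int) :
    pvL (n + 1) I = pvL n (PySem.Int.floordiv I 4) ++ [pvC I] := by
  induction n with
  | zero => rfl
  | succ n ih =>
    show pvC (pvD (n + 1) I) :: pvL (n + 1) I = pvC (pvD n _) :: pvL n _ ++ [pvC I]
    rw [ih, pvD_shift]
    rfl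

theorem pvC_eq_dict (I : Int) (h0 : 0 ≤ I) (h4 : I < 4) :
    (PySem.Dict.get? dict2 I).getD "" = pvC I := by
  interval_cases I <;> decide

-- one-step unfold lemmas for A's recursion (fuel is a variable, so nothing re-unfolds)
theorem N2Pgo_one (I : Int) (f : Nat) : N2Pgo I 1 (f + 1) = (PySem.Dict.get? dict2 I).getD "" := by
  simp [N2Pgo]

theorem N2Pgo_step (I k : Int) (f : Nat) (h : (k == 1) = false) :
    N2Pgo I k (f + 1) =
      N2Pgo (PySem.Int.floordiv I 4) (k - 1) f ++
        (PySem.Dict.get? dict2 (PySem.Int.mod I 4)).getD "" := by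
  simp [N2Pgo, h]

theorem pvA_eq (n : Nat) : ∀ (I : Int), 1 ≤ n → 0 ≤ I → I < (4 : Int) ^ n →
    N2Pgo I (n : Int) n = PySem.Str.join "" (pvL n I) := by
  induction n with
  | zero => intro I h; omega
  | succ n ih =>
    intro I _ h0 h4
    match n, ih with
    | 0, _ =>
      show N2Pgo I 1 1 = _
      rw [N2Pgo_one]
      have hL : pvL 1 I = [pvC I] := rfl
      have h44 : I < 4 := by simpa using h4
      rw [hL, pvJoin_singleton, pvC_eq_dict I h0 h44]
    | m + 1, ih =>
      have hk : ((((m : Nat) + 1 + 1 : Nat) : Int) == 1) = false := by simp; omega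
      rw [show ((m + 1 + 1 : Nat) : Nat) = (m + 1) + 1 from rfl]
      rw [N2Pgo_step _ _ _ hk]
      have harg : (((m + 1 + 1 : Nat) : Int)) - 1 = ((m + 1 : Nat) : Int) := by push_cast; ring
      rw [harg]
      have hI' : PySem.Int.floordiv I 4 = I / 4 :=
        PySem.Int.floordiv_eq_ediv_of_pos (by norm_num)
      have h0' : 0 ≤ PySem.Int.floordiv I 4 := by rw [hI']; positivity
      have h4' : PySem.Int.floordiv I 4 < (4 : Int) ^ (m + 1) := by
        rw [hI']
        have : I < 4 * 4 ^ (m + 1) := by rw [pow_succ] at h4; linarith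
        omega
      rw [ih (PySem.Int.floordiv I 4) (by omega) h0' h4']
      rw [pvL_shift (m + 1) I, pvJoin_append_singleton]
      have hmod : PySem.Int.mod I 4 = I % 4 := PySem.Int.mod_eq_emod_of_pos (by norm_num)
      have hmod0 : 0 ≤ I % 4 := Int.emod_nonneg I (by norm_num)
      have hmod4 : I % 4 < 4 := Int.emod_lt_of_pos I (by norm_num)
      congr 1
      rw [hmod, pvC_eq_dict (I % 4) hmod0 hmod4]
      show pvC (I % 4) = pvC I
      unfold pvC
      rw [show PySem.Int.mod (I % 4) 4 = PySem.Int.mod I 4 by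
        rw [PySem.Int.mod_eq_emod_of_pos (by norm_num), hmod]; omega]

-- ===== VERDICT (by name: the statement is the Claim_ definition above) =====
theorem N2P_spec : Claim_equal_N2P := by
  intro Index k _ hpre
  obtain ⟨hk, h0, h4⟩ := hpre
  show N2P Index k = N2P_alt Index k
  unfold N2P N2P_alt
  rw [pvFold_eq]
  have hkn : (k.toNat : Int) = k := Int.toNat_of_nonneg (by omega)
  have := pvA_eq k.toNat Index (by omega) h0 h4
  rw [hkn] at this
  exact this
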